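-- pv_equiv track=rewrite | github.com/stefantaubert/iterable-serialization | src/iterable_serialization/str_serialization.py | can_deserialize_iterable
-- ===== SOURCE A (Python) =====
-- def can_deserialize_iterable(serialized_iterable: str, split_symbol: str) -> bool:
--   no_of_subsequent_split_symbols = 1
--   last_char_was_non_split_symbol = False
--   for char in serialized_iterable:
--     if char == split_symbol:
--       no_of_subsequent_split_symbols += 1
--       last_char_was_non_split_symbol = False
--     else:
--       if no_of_subsequent_split_symbols % 2 == 0 and not last_char_was_non_split_symbol:
--         return False
--       no_of_subsequent_split_symbols = 0
--       last_char_was_non_split_symbol = True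
--   if no_of_subsequent_split_symbols % 2 == 0:
--     return True
--   return False
-- ===== SOURCE B (Python) =====
-- def can_deserialize_iterable(serialized_iterable: str, split_symbol: str) -> bool:
--   # Phase 1: run-length encode the string by "is this char the split symbol".
--   runs = []
--   for char in serialized_iterable:
--     is_split = char == split_symbol
--     if runs and runs[-1][0] == is_split:
--       runs[-1] = (is_split, runs[-1][1] + 1)
--     else:
--       runs.append((is_split, 1))
--   # Phase 2: parity rules on the runs: a leading or trailing split-run must have
--   # even length, an internal split-run odd length; a string that is one single
--   # split-run is valid iff its length is odd; the empty string is invalid.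
--   if not runs:
--     return False
--   if len(runs) == 1:
--     is_split, count = runs[0]
--     return count % 2 == 1 if is_split else True
--   for i, (is_split, count) in enumerate(runs):
--     if is_split and count % 2 == (1 if i == 0 or i == len(runs) - 1 else 0):
--       return False
--   return True
-- ===== Notes on version B (the rewrite author's own statement) =====
-- stated objective: alternative
-- what changed: Replaces the per-character two-flag state machine with a two-phase algorithm: run-length encode the string by is-split-symbol, then check a parity rule per run (leading/trailing split-run even, internal split-run odd, a pure split-run odd overall).
import Mathlib
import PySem

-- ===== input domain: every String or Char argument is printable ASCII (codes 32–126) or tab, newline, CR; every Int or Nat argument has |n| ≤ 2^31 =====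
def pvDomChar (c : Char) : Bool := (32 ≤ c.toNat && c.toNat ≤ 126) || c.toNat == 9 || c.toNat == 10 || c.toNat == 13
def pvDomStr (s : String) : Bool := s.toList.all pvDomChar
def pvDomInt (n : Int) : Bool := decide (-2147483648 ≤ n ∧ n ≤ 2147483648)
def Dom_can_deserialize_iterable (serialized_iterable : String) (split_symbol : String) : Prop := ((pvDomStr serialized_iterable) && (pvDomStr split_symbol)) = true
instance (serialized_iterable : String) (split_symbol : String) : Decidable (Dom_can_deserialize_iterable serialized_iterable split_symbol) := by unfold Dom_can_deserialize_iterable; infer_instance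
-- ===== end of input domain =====

-- B replaces A's per-character two-flag state machine by run-length encoding the
-- string and checking a parity rule per run (alternative decomposition, same O(n) cost).

-- ===== PORT A =====
-- A's for-loop over the characters with its two mutable state variables
-- (no_of_subsequent_split_symbols, last_char_was_non_split_symbol) and early `return False`.
def aLoop (split_symbol : String) : List Char → Nat → Bool → Bool
  | [], n, _ => n % 2 == 0
  | c :: cs, n, f =>
    if String.ofList [c] == split_symbol then
      aLoop split_symbol cs (n + 1) false
    else
      if n % 2 == 0 && !f then false
      else aLoop split_symbol cs 0 true

def can_deserialize_iterable (serialized_iterable : String) (split_symbol : String) : Bool :=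
  aLoop split_symbol serialized_iterable.toList 1 false

-- ===== PORT B =====
-- Source B phase 1: `runs.append((p,1))` / mutate `runs[-1]` is ported as cons onto a
-- reversed accumulator, with one final List.reverse after the fold.
def revPush (racc : List (Bool × Nat)) (p : Bool) : List (Bool × Nat) :=
  match racc with
  | (q, k) :: rt => if q == p then (q, k + 1) :: rt else (p, 1) :: (q, k) :: rt
  | [] => [(p, 1)]

-- Source B's indexed for-loop over the runs with its early `return False`.
def checkLoop (n : Nat) : Nat → List (Bool × Nat) → Bool
  | _, [] => true
  | i, (p, k) :: rest =>
    if p && (k % 2 == (if i == 0 || i == n - 1 then 1 else 0)) then false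
    else checkLoop n (i + 1) rest

-- Source B phase 2: the empty-runs and single-run branches, then the loop.
def phase2 (runs : List (Bool × Nat)) : Bool :=
  match runs with
  | [] => false
  | [(p, k)] => if p then k % 2 == 1 else true
  | _ => checkLoop runs.length 0 runs

def can_deserialize_iterable_alt (serialized_iterable : String) (split_symbol : String) : Bool :=
  phase2 ((serialized_iterable.toList.foldl
    (fun racc c => revPush racc (String.ofList [c] == split_symbol)) []).reverse)

-- ===== PRECONDITION & SPEC =====
def Spec_can_deserialize_iterable (serialized_iterable : String) (split_symbol : String) (out : Bool) : Prop := out = can_deserialize_iterable_alt serialized_iterable split_symbol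
instance (serialized_iterable : String) (split_symbol : String) (out : Bool) : Decidable (Spec_can_deserialize_iterable serialized_iterable split_symbol out) := by unfold Spec_can_deserialize_iterable; infer_instance

-- ===== CLAIM (what is proved, stated in full; the proofs are below) =====
def Claim_equal_can_deserialize_iterable : Prop := ∀ (serialized_iterable : String) (split_symbol : String), Dom_can_deserialize_iterable serialized_iterable split_symbol → Spec_can_deserialize_iterable serialized_iterable split_symbol (can_deserialize_iterable serialized_iterable split_symbol)

-- ===== LEMMAS AND PROOFS =====

-- Proof-side right-to-left run-length encoding of the character list.
def consRle (split_symbol : String) : List Char → List (Bool × Nat)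
  | [] => []
  | c :: cs =>
    let p := String.ofList [c] == split_symbol
    match consRle split_symbol cs with
    | (q, m) :: r => if q == p then (p, m + 1) :: r else (p, 1) :: (q, m) :: r
    | [] => [(p, 1)]

def G : Nat → Bool → List (Bool × Nat) → Bool
  | n, _, [] => n % 2 == 0
  | n, _, (true, m) :: r => G (n + m) false r
  | n, f, (false, _) :: r => if n % 2 == 0 && !f then false else G 0 true r

def Alt : List (Bool × Nat) → Prop
  | [] => True
  | [_] => True
  | a :: b :: r => a.1 ≠ b.1 ∧ Alt (b :: r)

def rstep (p : Bool) (b : List (Bool × Nat)) : List (Bool × Nat) :=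
  match b with
  | (q, m) :: bt => if q == p then (p, m + 1) :: bt else (p, 1) :: (q, m) :: bt
  | [] => [(p, 1)]

def glueR (racc b : List (Bool × Nat)) : List (Bool × Nat) :=
  match racc, b with
  | [], _ => b
  | (q, k) :: rt, [] => ((q, k) :: rt).reverse
  | (q, k) :: rt, (p, m) :: bt =>
    if q == p then rt.reverse ++ (q, k + m) :: bt else ((q, k) :: rt).reverse ++ (p, m) :: bt

theorem consRle_cons (ss : String) (c : Char) (cs : List Char) :
    consRle ss (c :: cs) = rstep (String.ofList [c] == ss) (consRle ss cs) := by
  simp [consRle, rstep]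

theorem glueR_rstep (p : Bool) (racc b : List (Bool × Nat)) :
    glueR racc (rstep p b) = glueR (revPush racc p) b := by
  rcases racc with _ | ⟨⟨q, k⟩, rt⟩ <;> rcases b with _ | ⟨⟨r, m⟩, bt⟩
  · cases p <;> simp [glueR, rstep, revPush]
  · cases p <;> cases r <;> simp [glueR, rstep, revPush] <;> omega
  · cases p <;> cases q <;> simp [glueR, rstep, revPush]
  · cases p <;> cases q <;> cases r <;> simp [glueR, rstep, revPush] <;> omega

theorem foldl_revPush (ss : String) : ∀ (cs : List Char) (racc : List (Bool × Nat)),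
    cs.foldl (fun r c => revPush r (String.ofList [c] == ss)) racc = (glueR racc (consRle ss cs)).reverse := by
  intro cs
  induction cs with
  | nil =>
    intro racc
    rcases racc with _ | ⟨⟨q, k⟩, rt⟩ <;> simp [consRle, glueR]
  | cons c cs ih =>
    intro racc
    simp only [List.foldl_cons, ih, consRle_cons, glueR_rstep]

theorem alt_rstep (p : Bool) (b : List (Bool × Nat)) (h : Alt b) : Alt (rstep p b) := by
  rcases b with _ | ⟨⟨q, m⟩, bt⟩
  · simp [rstep, Alt]
  · by_cases hq : q = p
    · subst hq
      simp only [rstep, beq_self_eq_true, if_pos]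
      rcases bt with _ | ⟨⟨q2, m2⟩, bt2⟩
      · simp [Alt]
      · exact h
    · have : (q == p) = false := by simp [hq]
      simp only [rstep, this, Bool.false_eq_true, if_neg]
      exact ⟨fun he => hq he.symm, h⟩

theorem alt_consRle (ss : String) : ∀ cs, Alt (consRle ss cs) := by
  intro cs
  induction cs with
  | nil => simp [consRle, Alt]
  | cons c cs ih => rw [consRle_cons]; exact alt_rstep _ _ ih

theorem aLoop_eq_G (ss : String) : ∀ cs n f, aLoop ss cs n f = G n f (consRle ss cs) := by
  intro cs
  induction cs with
  | nil => intro n f; simp [aLoop, consRle, G]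
  | cons c cs ih =>
    intro n f
    rw [consRle_cons]
    cases hp : (String.ofList [c] == ss) <;>
      rcases h : consRle ss cs with _ | ⟨⟨q, m⟩, r⟩
    · simp [aLoop, hp, rstep, G, ih, h]
    · cases q
      · simp only [rstep, beq_self_eq_true, if_pos]
        simp only [aLoop, hp, Bool.false_eq_true, if_neg, ih, h]
        simp [G]
      · simp only [rstep, show ((true : Bool) == false) = false by rfl, Bool.false_eq_true, if_neg]
        simp [aLoop, hp, ih, h, G]
    · simp [aLoop, hp, rstep, G, ih, h]
    · cases q
      · simp only [rstep, show ((false : Bool) == true) = false by rfl, Bool.false_eq_true, if_neg]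
        simp [aLoop, hp, ih, h, G]
      · simp only [rstep, beq_self_eq_true, if_pos]
        simp only [aLoop, hp, if_pos, ih, h, G]
        congr 1
        omega

theorem G_checkLoop (rest : List (Bool × Nat)) (i n : Nat) (hi : 1 ≤ i)
    (hn : i + rest.length = n) (halt : Alt rest) : G 0 true rest = checkLoop n i rest := by
  match rest with
  | [] => simp [G, checkLoop]
  | (false, m) :: rt =>
    have halt' : Alt rt := by
      rcases rt with _ | ⟨b, rt2⟩
      · trivial
      · exact halt.2
    have hrec := G_checkLoop rt (i + 1) n (by omega) (by simp at hn ⊢; omega) halt'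
    simp [G, checkLoop, hrec]
  | (true, k) :: rt =>
    match rt with
    | [] =>
      have hl : (i == n - 1) = true := by simp at hn ⊢; omega
      by_cases hk : k % 2 = 1
      · simp [G, checkLoop, hl, hk]
      · have hk0 : k % 2 = 0 := by omega
        simp [G, checkLoop, hl, hk0]
    | (q2, m) :: rt2 =>
      have hq2 : q2 = false := by
        cases q2
        · rfl
        · exact absurd rfl halt.1
      subst hq2
      have hne0 : (i == 0) = false := by simp; omega
      have hnel : (i == n - 1) = false := by simp at hn ⊢; omega
      have halt2 : Alt rt2 := by
        rcases rt2 with _ | ⟨b, rt3⟩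
        · trivial
        · exact halt.2.2
      have hrec := G_checkLoop rt2 (i + 2) n (by omega) (by simp at hn ⊢; omega) halt2
      by_cases hk : k % 2 = 0
      · simp [G, checkLoop, hne0, hnel, hk]
      · have hk1 : k % 2 = 1 := by omega
        simp [G, checkLoop, hne0, hnel, hk1, hrec, show i + 1 + 1 = i + 2 by omega]
  termination_by rest.length

theorem G_phase2 (r : List (Bool × Nat)) (halt : Alt r) : G 1 false r = phase2 r := by
  match r with
  | [] => simp [G, phase2]
  | [(p, k)] =>
    cases p
    · simp [G, phase2]
    · simp only [G, phase2, if_pos]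
      cases h : ((1 + k) % 2 == 0) <;> simp at h ⊢ <;> omega
  | (p1, k1) :: (p2, k2) :: rt =>
    match p1 with
    | false =>
      have hrec := G_checkLoop ((p2, k2) :: rt) 1 (((false, k1) :: (p2, k2) :: rt)).length
        (by omega) (by simp; omega) halt.2
      simp [G, phase2, checkLoop, hrec]
    | true =>
      have hp2 : p2 = false := by
        cases p2
        · rfl
        · exact absurd rfl halt.1
      subst hp2
      have halt2 : Alt rt := by
        rcases rt with _ | ⟨b, rt2⟩
        · trivial
        · exact halt.2.2
      have hrec := G_checkLoop rt 2 (((true, k1) :: (false, k2) :: rt)).length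
        (by omega) (by simp; omega) halt2
      by_cases hk : k1 % 2 = 1
      · have : ((1 + k1) % 2 == 0) = true := by simp; omega
        simp [G, phase2, checkLoop, this, hk]
      · have hk0 : k1 % 2 = 0 := by omega
        have : ((1 + k1) % 2 == 0) = false := by simp; omega
        simp [G, phase2, checkLoop, this, hk0, hrec]


-- ===== VERDICT (by name: the statement is the Claim_ definition above) =====
theorem can_deserialize_iterable_spec : Claim_equal_can_deserialize_iterable := by
  intro s ss _
  unfold Spec_can_deserialize_iterable can_deserialize_iterable can_deserialize_iterable_alt
  rw [aLoop_eq_G, foldl_revPush]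
  have h0 : glueR [] (consRle ss s.toList) = consRle ss s.toList := by simp [glueR]
  rw [h0, List.reverse_reverse]
  exact G_phase2 _ (alt_consRle ss s.toList)
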